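-- pv_equiv track=rewrite | github.com/matijapretnar/uvod-v-programiranje | 06-slovarji-in-mnozice/najvisja_ocena.py | najvisja_ocena
-- ===== SOURCE A (Python) =====
-- def najvisja_ocena(ocene):
--     max_predmet = None
--     max_ocena = 5
--     for predmet, ocena in ocene.items():
--         if ocena > max_ocena:
--             max_predmet = predmet
--             max_ocena = ocena
--     return max_predmet, max_ocena
-- ===== SOURCE B (Python) =====
-- def najvisja_ocena(ocene):
--     m = max(ocene.values(), default=5)
--     if m > 5:
--         for predmet, ocena in ocene.items():
--             if ocena == m:
--                 return predmet, m
--     return None, 5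
-- ===== Notes on version B (the rewrite author's own statement) =====
-- stated objective: alternative
-- what changed: Replaces the single-pass running-(key,grade) accumulator with two staged passes: first the maximum over the grade values alone (default 5), then, only if it exceeds 5, a separate lookup of the first subject attaining that maximum.
import Mathlib
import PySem

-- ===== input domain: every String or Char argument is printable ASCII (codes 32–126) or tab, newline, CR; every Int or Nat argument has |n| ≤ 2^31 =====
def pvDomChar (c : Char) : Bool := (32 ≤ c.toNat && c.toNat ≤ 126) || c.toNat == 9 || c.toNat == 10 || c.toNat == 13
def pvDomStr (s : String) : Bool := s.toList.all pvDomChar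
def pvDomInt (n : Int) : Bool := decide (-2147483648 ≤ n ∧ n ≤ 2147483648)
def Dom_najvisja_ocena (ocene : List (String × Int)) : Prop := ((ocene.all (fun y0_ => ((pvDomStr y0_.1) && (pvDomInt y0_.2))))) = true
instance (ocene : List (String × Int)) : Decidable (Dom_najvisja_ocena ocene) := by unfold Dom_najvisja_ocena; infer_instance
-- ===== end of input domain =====

-- B replaces A's single running-(key,grade) scan by two staged passes: the max of the values alone, then a lookup of the first key attaining it (alternative decomposition, same cost).

-- ===== PORT A =====
def najvisja_ocena (ocene : List (String × Int)) : Option String × Int :=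
  ocene.foldl
    (fun acc po => if po.2 > acc.2 then (some po.1, po.2) else acc)
    ((none : Option String), (5 : Int))

-- ===== PORT B =====
def najvisja_ocena_alt (ocene : List (String × Int)) : Option String × Int :=
  let m := (PySem.List.max? (ocene.map Prod.snd) (fun y => y)).getD 5
  if 5 < m then
    match ocene.find? (fun po => po.2 == m) with
    | some po => (some po.1, m)
    | none => (none, 5)
  else (none, 5)

-- ===== PRECONDITION & SPEC =====
def Spec_najvisja_ocena (ocene : List (String × Int)) (out : Option String × Int) : Prop := out = najvisja_ocena_alt ocene
instance (ocene : List (String × Int)) (out : Option String × Int) : Decidable (Spec_najvisja_ocena ocene out) := by unfold Spec_najvisja_ocena; infer_instance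

-- ===== CLAIM (what is proved, stated in full; the proofs are below) =====
def Claim_equal_najvisja_ocena : Prop := ∀ (ocene : List (String × Int)), Dom_najvisja_ocena ocene → Spec_najvisja_ocena ocene (najvisja_ocena ocene)

-- ===== LEMMAS AND PROOFS =====

-- bridge spec: right-to-left recursion, earlier element wins ties
def pvG : List (String × Int) → Option String × Int
  | [] => (none, 5)
  | x :: t =>
    let r := pvG t
    if 5 < x.2 ∧ r.2 ≤ x.2 then (some x.1, x.2) else r

lemma pvG_snd_ge (l : List (String × Int)) : 5 ≤ (pvG l).2 := by
  induction l with
  | nil => simp [pvG]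
  | cons x t ih => simp only [pvG]; split <;> omega

lemma foldl_max_init (vs : List Int) : ∀ a b : Int, vs.foldl max (max a b) = max a (vs.foldl max b) := by
  induction vs with
  | nil => intro a b; simp
  | cons v t ih =>
    intro a b
    simp only [List.foldl_cons, max_assoc]
    exact ih a (max b v)

-- (pvG l).2 is the running max of the values seeded with 5
lemma pvG_snd (l : List (String × Int)) : (pvG l).2 = (l.map Prod.snd).foldl max 5 := by
  induction l with
  | nil => simp [pvG]
  | cons x t ih =>
    have hseed : (max 5 x.2 : Int) = max x.2 5 := max_comm _ _
    have hinit := foldl_max_init (t.map Prod.snd) x.2 5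
    have hge := pvG_snd_ge t
    simp only [pvG, List.map_cons, List.foldl_cons, hseed, hinit, ← ih]
    split
    · next h => simp [max_eq_left h.2]
    · next h =>
      rcases not_and_or.mp h with h1 | h2
      · have : (pvG t).2 = max x.2 (pvG t).2 := by omega
        omega
      · have : (pvG t).2 = max x.2 (pvG t).2 := by omega
        omega

lemma pvG_small (l : List (String × Int)) (h : (pvG l).2 ≤ 5) : pvG l = (none, 5) := by
  induction l with
  | nil => simp [pvG]
  | cons x t ih =>
    simp only [pvG] at h ⊢
    by_cases hx : 5 < x.2 ∧ (pvG t).2 ≤ x.2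
    · rw [if_pos hx] at h; exfalso; simp only at h; omega
    · rw [if_neg hx] at h ⊢; exact ih h

lemma pvG_find (l : List (String × Int)) (M : Int) (hM : 5 < M) (h2 : (pvG l).2 = M) :
    ∃ p, pvG l = (some p, M) ∧ l.find? (fun po => po.2 == M) = some (p, M) := by
  induction l with
  | nil => simp [pvG] at h2; omega
  | cons x t ih =>
    obtain ⟨xk, xv⟩ := x
    simp only [pvG] at h2 ⊢
    by_cases hx : 5 < xv ∧ (pvG t).2 ≤ xv
    · rw [if_pos hx] at h2 ⊢
      have hxM : xv = M := h2
      refine ⟨xk, by rw [hxM], ?_⟩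
      simp [List.find?, hxM]
    · rw [if_neg hx] at h2 ⊢
      obtain ⟨p, hp, hf⟩ := ih h2
      have hne : xv ≠ M := by
        rcases not_and_or.mp hx with h1 | h1 <;> omega
      refine ⟨p, hp, ?_⟩
      simp only [List.find?]
      rw [show ((xk, xv).2 == M) = false by simp [hne]]
      exact hf

-- A's left fold equals pvG, generalized over the accumulator (earlier element wins)
lemma foldA_eq (l : List (String × Int)) : ∀ (a : Option String × Int), 5 ≤ a.2 →
    l.foldl (fun acc po => if po.2 > acc.2 then (some po.1, po.2) else acc) a
      = if (pvG l).2 ≤ a.2 then a else pvG l := by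
  induction l with
  | nil =>
    intro a ha
    simp only [List.foldl_nil]
    rw [if_pos (by simpa [pvG] using ha)]
  | cons x t ih =>
    intro a ha
    simp only [List.foldl_cons, pvG]
    by_cases hx : x.2 > a.2
    · rw [if_pos hx]
      rw [ih (some x.1, x.2) (by simp; omega)]
      by_cases h1 : 5 < x.2 ∧ (pvG t).2 ≤ x.2
      · rw [if_pos h1]
        simp only
        rw [if_pos h1.2, if_neg (by simp; omega)]
      · rw [if_neg h1]
        have : ¬ (pvG t).2 ≤ x.2 := by
          rcases not_and_or.mp h1 with h | h
          · omega
          · exact h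
        rw [if_neg this, if_neg (by omega)]
    · rw [if_neg hx]
      rw [ih a ha]
      by_cases h1 : 5 < x.2 ∧ (pvG t).2 ≤ x.2
      · rw [if_pos h1]
        simp only
        rw [if_pos (by omega)]
        rw [if_pos (by omega)]
      · rw [if_neg h1]

lemma A_eq_pvG (l : List (String × Int)) : najvisja_ocena l = pvG l := by
  unfold najvisja_ocena
  rw [foldA_eq l ((none : Option String), (5 : Int)) (by simp)]
  by_cases h : (pvG l).2 ≤ 5
  · rw [if_pos h, pvG_small l h]
  · rw [if_neg h]

lemma B_eq_pvG (l : List (String × Int)) : najvisja_ocena_alt l = pvG l := by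
  unfold najvisja_ocena_alt
  cases l with
  | nil => simp [pvG, PySem.List.max?]
  | cons x t =>
    have hmax : PySem.List.max? ((x :: t).map Prod.snd) (fun y => y)
        = some ((t.map Prod.snd).foldl max x.2) := by
      simp only [List.map_cons]
      exact PySem.List.max?_id_cons x.2 (t.map Prod.snd)
    set M := (t.map Prod.snd).foldl max x.2 with hMdef
    have hG : (pvG (x :: t)).2 = max 5 M := by
      rw [pvG_snd]
      simp only [List.map_cons, List.foldl_cons]
      exact foldl_max_init (t.map Prod.snd) 5 x.2
    simp only [hmax, Option.getD_some]
    by_cases h5 : 5 < M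
    · rw [if_pos h5]
      have h2 : (pvG (x :: t)).2 = M := by rw [hG]; omega
      obtain ⟨p, hp, hf⟩ := pvG_find (x :: t) M h5 h2
      rw [hf, hp]
    · rw [if_neg h5]
      have : (pvG (x :: t)).2 ≤ 5 := by rw [hG]; omega
      rw [pvG_small _ this]

-- ===== VERDICT (by name: the statement is the Claim_ definition above) =====
theorem najvisja_ocena_spec : Claim_equal_najvisja_ocena := by
  intro ocene _
  unfold Spec_najvisja_ocena
  rw [A_eq_pvG, B_eq_pvG]
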